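-- pv_equiv track=rewrite | github.com/Kabilanmmks/placement-training | 27.07.2024/Piling Up!.py | can_stack_cubes
-- ===== SOURCE A (Python) =====
-- def can_stack_cubes(cubes):
--     left = 0
--     right = len(cubes) - 1
--     last = float('inf')
--
--     while left <= right:
--         if cubes[left] >= cubes[right]:
--             current = cubes[left]
--             left += 1
--         else:
--             current = cubes[right]
--             right -= 1
--
--         if current > last:
--             return "No"
--
--         last = current
--
--     return "Yes"
-- ===== SOURCE B (Python) =====
-- def can_stack_cubes(cubes):
--     # Single forward scan with a phase flag: "Yes" iff the list is a
--     # non-increasing prefix followed by a non-decreasing suffix.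
--     down = True
--     for a, b in zip(cubes, cubes[1:]):
--         if down and a < b:
--             down = False
--         if not down and a > b:
--             return "No"
--     return "Yes"
-- ===== Notes on version B (the rewrite author's own statement) =====
-- stated objective: idiomatic
-- what changed: Replaces the two-pointer greedy that consumes the larger of the two ends while tracking the last stacked value by a single forward scan over adjacent pairs with a down/up phase flag, testing that the list is non-increasing then non-decreasing (valley-shaped).
import Mathlib
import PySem

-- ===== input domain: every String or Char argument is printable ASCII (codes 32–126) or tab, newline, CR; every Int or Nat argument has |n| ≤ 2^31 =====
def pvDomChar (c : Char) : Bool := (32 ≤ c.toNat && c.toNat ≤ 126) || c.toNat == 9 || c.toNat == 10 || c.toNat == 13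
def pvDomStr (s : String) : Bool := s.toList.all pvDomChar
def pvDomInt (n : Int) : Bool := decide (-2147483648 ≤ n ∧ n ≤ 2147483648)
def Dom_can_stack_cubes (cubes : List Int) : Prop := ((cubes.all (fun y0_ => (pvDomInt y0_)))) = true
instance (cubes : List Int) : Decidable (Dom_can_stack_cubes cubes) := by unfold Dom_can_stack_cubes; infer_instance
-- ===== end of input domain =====

-- B replaces A's two-pointer greedy (consuming from both ends) by a single forward
-- scan with a phase flag testing the valley shape; objective: idiomatic/simpler.

-- ===== PORT A =====
-- 'last = float(inf)' is modelled as Option Int: none = infinity, so 'current > last' is false.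
def pvGtLast (c : Int) (last : Option Int) : Bool :=
  match last with
  | none => false
  | some v => decide (v < c)

-- the while loop of A over state (left, right, last); indices are always in range
-- when the loop runs (0 ≤ left ≤ right < len), so the .getD 0 defaults are dead.
def pvALoop (cubes : List Int) (left right : Int) (last : Option Int) : String :=
  if _h : left ≤ right then
    let cl := (PySem.List.pyGet? cubes left).getD 0
    let cr := (PySem.List.pyGet? cubes right).getD 0
    if cl ≥ cr then
      if pvGtLast cl last then "No" else pvALoop cubes (left + 1) right (some cl)
    else
      if pvGtLast cr last then "No" else pvALoop cubes left (right - 1) (some cr)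
  else "Yes"
termination_by (right + 1 - left).toNat
decreasing_by all_goals omega

def can_stack_cubes (cubes : List Int) : String :=
  pvALoop cubes 0 ((cubes.length : Int) - 1) none

-- ===== PORT B =====
-- the for-loop over adjacent pairs zip(cubes, cubes[1:]) with the phase flag 'down'
def pvBScan : Bool → List Int → String
  | down, x :: y :: rest =>
    let down' := if down && decide (x < y) then false else down
    if !down' && decide (y < x) then "No" else pvBScan down' (y :: rest)
  | _, _ => "Yes"

def can_stack_cubes_alt (cubes : List Int) : String :=
  pvBScan true cubes

-- ===== PRECONDITION & SPEC =====
def Spec_can_stack_cubes (cubes : List Int) (out : String) : Prop := out = can_stack_cubes_alt cubes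
instance (cubes : List Int) (out : String) : Decidable (Spec_can_stack_cubes cubes out) := by unfold Spec_can_stack_cubes; infer_instance

-- ===== CLAIM (what is proved, stated in full; the proofs are below) =====
def Claim_equal_can_stack_cubes : Prop := ∀ (cubes : List Int), Dom_can_stack_cubes cubes → Spec_can_stack_cubes cubes (can_stack_cubes cubes)

-- ===== LEMMAS AND PROOFS =====

-- list-level mirror of A's loop: take from the head or the last element
def pvG (last : Option Int) (xs : List Int) : String :=
  if h : xs = [] then "Yes"
  else
    let x := xs.headD 0
    let z := xs.getLastD 0
    if x ≥ z then
      if pvGtLast x last then "No" else pvG (some x) xs.tail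
    else
      if pvGtLast z last then "No" else pvG (some z) xs.dropLast
termination_by xs.length
decreasing_by
  · cases xs with | nil => simp at h | cons a t => simp
  · cases xs with | nil => simp at h | cons a t => simp [List.length_dropLast]

-- nondecreasing test, Bool
def pvNondec : List Int → Bool
  | x :: y :: t => decide (x ≤ y) && pvNondec (y :: t)
  | _ => true

-- valley test, Bool
def pvValley : List Int → Bool
  | x :: y :: t => if x ≥ y then pvValley (y :: t) else pvNondec (y :: t)
  | _ => true

-- nonincreasing test, Bool (the shape of A's/B's down phase)
def pvNoninc : List Int → Bool
  | x :: y :: t => decide (y ≤ x) && pvNoninc (y :: t)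
  | _ => true

theorem nd_head_le_last : ∀ (t : List Int) (d : Int), pvNondec t = true → t.headD d ≤ t.getLastD d
  | [], _, _ => le_refl _
  | [_], _, _ => le_refl _
  | x :: y :: t, d, h => by
    simp only [pvNondec, Bool.and_eq_true, decide_eq_true_eq] at h
    have := nd_head_le_last (y :: t) d h.2
    simp only [List.headD_cons, List.getLastD_cons] at *
    omega

theorem ni_last_le_head : ∀ (t : List Int) (d : Int), pvNoninc t = true → t.getLastD d ≤ t.headD d
  | [], _, _ => le_refl _
  | [_], _, _ => le_refl _
  | x :: y :: t, d, h => by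
    simp only [pvNoninc, Bool.and_eq_true, decide_eq_true_eq] at h
    have := ni_last_le_head (y :: t) d h.2
    simp only [List.headD_cons, List.getLastD_cons] at *
    omega

theorem nd_app : ∀ (ys : List Int) (z : Int),
    pvNondec (ys ++ [z]) = (pvNondec ys && decide (ys.getLastD z ≤ z))
  | [], z => by simp [pvNondec]
  | [y], z => by simp [pvNondec]
  | y :: y' :: t, z => by
    have ih := nd_app (y' :: t) z
    simp only [List.cons_append] at *
    simp only [pvNondec, ih, List.getLastD_cons, Bool.and_assoc]

theorem valley_app : ∀ (ys : List Int) (z : Int),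
    pvValley (ys ++ [z]) = if ys.getLastD z ≤ z then pvValley ys else pvNoninc ys
  | [], z => by simp [pvValley, pvNoninc]
  | [y], z => by
    simp only [List.cons_append, List.nil_append, pvValley, pvNondec, pvNoninc, List.getLastD_cons,
      List.getLastD_nil]
    split <;> split <;> simp_all <;> omega
  | y :: y' :: t, z => by
    have ih := valley_app (y' :: t) z
    have hnd := nd_app (y' :: t) z
    simp only [List.cons_append] at *
    simp only [pvValley, pvNoninc, ih, hnd, List.getLastD_cons]
    by_cases h1 : y' ≤ y <;> by_cases h2 : (y' :: t).getLastD z ≤ z <;>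
      simp [h1, h2, ge_iff_le, Bool.and_comm] <;> omega

-- with the last element ≤ x, consing x keeps the valley shape iff the head is ≤ x
theorem valley_cons (x : Int) (t : List Int) (h : t.getLastD x ≤ x) :
    pvValley (x :: t) = (pvValley t && decide (t.headD x ≤ x)) := by
  cases t with
  | nil => simp [pvValley]
  | cons y t' =>
    by_cases hy : y ≤ x
    · simp [pvValley, ge_iff_le, hy]
    · simp only [pvValley, ge_iff_le, if_neg hy, List.headD_cons, decide_eq_true_eq]
      cases hnd : pvNondec (y :: t') with
      | false => simp [hy]
      | true =>
        exfalso
        have := nd_head_le_last (y :: t') x hnd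
        simp only [List.headD_cons, List.getLastD_cons] at this h
        omega

theorem getLastD_congr (t : List Int) (h : t ≠ []) (d d' : Int) : t.getLastD d = t.getLastD d' := by
  rw [List.getLastD_eq_getLast?, List.getLastD_eq_getLast?, List.getLast?_eq_some_getLast h]
  rfl

theorem g_some (xs : List Int) (v : Int) :
    pvG (some v) xs =
      if pvValley xs && decide (xs.headD v ≤ v) && decide (xs.getLastD v ≤ v) then "Yes" else "No" := by
  cases hx : xs with
  | nil => simp [pvG, pvValley]
  | cons x t =>
    rw [pvG]
    simp only [reduceDIte, List.headD_cons, pvGtLast, List.tail_cons,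
      reduceCtorEq, dite_false]
    have hzv : (x :: t).getLastD v = (x :: t).getLastD 0 := getLastD_congr _ (by simp) v 0
    by_cases hge : (x :: t).getLastD 0 ≤ x
    · -- take from the left
      rw [if_pos (by exact hge)]
      have ih := g_some t x
      rw [ih]
      by_cases hb : v < x
      · rw [if_pos (by simpa using hb)]
        have : ¬ ((x : Int) ≤ v) := by omega
        simp [this]
      · rw [if_neg (by simpa using hb)]
        have hxv : (x : Int) ≤ v := by omega
        rcases t with _ | ⟨a, b⟩
        · simp [pvValley, hxv]
        · simp only [List.getLastD_cons] at hge
          have hlast : (a :: b).getLastD x ≤ x := by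
            simp only [List.getLastD_cons]; exact hge
          have hv := valley_cons x (a :: b) hlast
          simp only [List.headD_cons] at hv
          have hLv : b.getLastD a ≤ v := by omega
          simp only [List.getLastD_cons, List.headD_cons]
          simp only [List.getLastD_eq_getLast?] at hge hLv
          simp [hv, hge, hxv, hLv]
    · -- take from the right
      rw [if_neg (by exact hge)]
      have ht : t ≠ [] := by
        intro h; subst h; simp at hge
      have hz0 : (x :: t).getLastD 0 = t.getLast ht := by
        rw [List.getLastD_cons, List.getLastD_eq_getLast?, List.getLast?_eq_some_getLast ht]
        rfl
      set z := t.getLast ht with hzdef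
      have hxz : x < z := by omega
      have hdecomp : x :: t = (x :: t.dropLast) ++ [z] := by
        simp [hzdef, List.dropLast_concat_getLast ht]
      have hlen : (x :: t.dropLast).length < (x :: t).length := by
        simp only [List.length_dropLast, List.length_cons]
        cases t with
        | nil => exact absurd rfl ht
        | cons a b => simp
      have ih := g_some (x :: t.dropLast) z
      have hdl : (x :: t).dropLast = x :: t.dropLast := by
        cases t with
        | nil => exact absurd rfl ht
        | cons a b => simp
      rw [hz0, hdl, ih]
      have hva := valley_app (x :: t.dropLast) z
      have hvx : pvValley (x :: t) = pvValley ((x :: t.dropLast) ++ [z]) := by rw [← hdecomp]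
      have hzvz : (x :: t).getLastD v = z := by
        rw [hzv, hz0]
      by_cases hb : v < z
      · rw [if_pos (by simpa using hb)]
        have hnz : ¬ ((z : Int) ≤ v) := by omega
        rw [List.getLastD_eq_getLast?] at hzvz
        simp [hzvz, hnz]
      · rw [if_neg (by simpa using hb)]
        have hzle : (z : Int) ≤ v := by omega
        have hxv : (x : Int) ≤ v := by omega
        rw [hvx, hva, hzvz]
        simp only [List.headD_cons]
        by_cases hL : (x :: t.dropLast).getLastD z ≤ z
        · simp only [if_pos hL]
          simp only [List.getLastD_eq_getLast?] at hL
          simp [le_of_lt hxz, hzle, hL, hxv]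
        · simp only [if_neg hL]
          have hni : pvNoninc (x :: t.dropLast) = false := by
            cases hni : pvNoninc (x :: t.dropLast) with
            | false => rfl
            | true =>
              exfalso
              have := ni_last_le_head (x :: t.dropLast) z hni
              simp only [List.headD_cons] at this
              omega
          simp only [List.getLastD_eq_getLast?] at hL
          simp [hni, hL]
termination_by xs.length
decreasing_by
  · simp
  · exact hlen

theorem g_none (xs : List Int) :
    pvG none xs = if pvValley xs then "Yes" else "No" := by
  cases xs with
  | nil => simp [pvG, pvValley]
  | cons x t =>
    rw [pvG]
    simp only [reduceDIte, List.headD_cons, pvGtLast, List.tail_cons, reduceCtorEq, dite_false,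
      Bool.false_eq_true, if_false]
    by_cases hge : (x :: t).getLastD 0 ≤ x
    · rw [if_pos (by exact hge)]
      rw [g_some]
      rcases t with _ | ⟨a, b⟩
      · simp [pvValley]
      · simp only [List.getLastD_cons] at hge
        have hlast : (a :: b).getLastD x ≤ x := by
          simp only [List.getLastD_cons]; exact hge
        have hv := valley_cons x (a :: b) hlast
        simp only [List.headD_cons] at hv
        simp only [List.getLastD_cons, List.headD_cons]
        simp only [List.getLastD_eq_getLast?] at hge
        simp [hv, hge]
    · rw [if_neg (by exact hge)]
      have ht : t ≠ [] := by intro h; subst h; simp at hge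
      have hz0 : (x :: t).getLastD 0 = t.getLast ht := by
        rw [List.getLastD_cons, List.getLastD_eq_getLast?, List.getLast?_eq_some_getLast ht]
        rfl
      set z := t.getLast ht with hzdef
      have hxz : x < z := by omega
      have hdl : (x :: t).dropLast = x :: t.dropLast := by
        cases t with
        | nil => exact absurd rfl ht
        | cons a b => simp
      rw [hz0, hdl, g_some]
      have hdecomp : x :: t = (x :: t.dropLast) ++ [z] := by
        simp [hzdef, List.dropLast_concat_getLast ht]
      have hva := valley_app (x :: t.dropLast) z
      have hvx : pvValley (x :: t) = pvValley ((x :: t.dropLast) ++ [z]) := by rw [← hdecomp]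
      rw [hvx, hva]
      simp only [List.headD_cons]
      by_cases hL : (x :: t.dropLast).getLastD z ≤ z
      · simp only [if_pos hL]
        have hL' := hL
        simp only [List.getLastD_eq_getLast?] at hL'
        simp [hL', le_of_lt hxz]
      · simp only [if_neg hL]
        have hni : pvNoninc (x :: t.dropLast) = false := by
          cases hni : pvNoninc (x :: t.dropLast) with
          | false => rfl
          | true =>
            exfalso
            have := ni_last_le_head (x :: t.dropLast) z hni
            simp only [List.headD_cons] at this
            omega
        have hL' := hL
        simp only [List.getLastD_eq_getLast?] at hL'
        simp [hni, hL']

theorem bScan_false : ∀ (xs : List Int), pvBScan false xs = if pvNondec xs then "Yes" else "No"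
  | [] => by simp [pvBScan, pvNondec]
  | [x] => by simp [pvBScan, pvNondec]
  | x :: y :: t => by
    have ih := bScan_false (y :: t)
    by_cases h : x ≤ y
    · have hyx : ¬ (y < x) := not_lt.mpr h
      simp [pvBScan, pvNondec, h, hyx, ih]
    · have hyx : y < x := not_le.mp h
      simp [pvBScan, pvNondec, h, hyx, ih]

theorem bScan_true : ∀ (xs : List Int), pvBScan true xs = if pvValley xs then "Yes" else "No"
  | [] => by simp [pvBScan, pvValley]
  | [x] => by simp [pvBScan, pvValley]
  | x :: y :: t => by
    by_cases h : y ≤ x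
    · have ih := bScan_true (y :: t)
      simp [pvBScan, pvValley, ge_iff_le, h, ih, not_lt.mpr h]
    · have ih := bScan_false (y :: t)
      have hxy : x < y := not_le.mp h
      simp [pvBScan, pvValley, ge_iff_le, h, ih, hxy, not_lt.mpr (le_of_lt hxy)]

theorem aLoop_eq_g : ∀ (n : ℕ) (cubes : List Int) (l r : Int) (last : Option Int),
    0 ≤ l → r < cubes.length → (r + 1 - l).toNat = n →
    pvALoop cubes l r last = pvG last ((cubes.drop l.toNat).take n)
  | 0, cubes, l, r, last, hl, hr, hn => by
    have hlr : ¬ l ≤ r := by omega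
    rw [pvALoop]
    simp [hlr, pvG]
  | n + 1, cubes, l, r, last, hl, hr, hn => by
    have hlr : l ≤ r := by omega
    have hlN : l.toNat < cubes.length := by omega
    have hrN : r.toNat < cubes.length := by omega
    have hln : l.toNat + n = r.toNat := by omega
    set s := (cubes.drop l.toNat).take (n + 1) with hs
    have hslen : s.length = n + 1 := by
      simp [hs, List.length_take, List.length_drop]; omega
    have hsne : s ≠ [] := by intro h; rw [h] at hslen; simp at hslen
    have hhead : s.headD 0 = cubes[l.toNat] := by
      rw [List.headD_eq_head?_getD, List.head?_eq_getElem?, hs]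
      rw [List.getElem?_take, List.getElem?_drop]
      simp [List.getElem?_eq_getElem hlN]
    have hlastg : s.getLastD 0 = cubes[r.toNat] := by
      rw [List.getLastD_eq_getLast?, List.getLast?_eq_getElem?, hslen]
      simp only [Nat.add_sub_cancel, hs]
      rw [List.getElem?_take, List.getElem?_drop]
      have hlt : l.toNat + n < cubes.length := by omega
      rw [if_pos (Nat.lt_succ_self n), List.getElem?_eq_getElem hlt]
      simp only [Option.getD_some]
      congr 1
    have htail : s.tail = (cubes.drop (l + 1).toNat).take n := by
      have h1 : (l + 1).toNat = l.toNat + 1 := by omega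
      rw [hs, ← List.drop_one, List.drop_take, List.drop_drop, h1]
      norm_num
    have hdlast : s.dropLast = (cubes.drop l.toNat).take n := by
      rw [hs, List.dropLast_eq_take, hslen]
      simp [List.take_take]
    have hcl : (PySem.List.pyGet? cubes l).getD 0 = cubes[l.toNat] := by
      rw [PySem.List.pyGet?_eq_some_getElem cubes hl (by omega)]; rfl
    have hcr : (PySem.List.pyGet? cubes r).getD 0 = cubes[r.toNat] := by
      rw [PySem.List.pyGet?_eq_some_getElem cubes (by omega) (by omega)]; rfl
    rw [pvALoop, pvG]
    simp only [dif_pos hlr, dif_neg hsne, hcl, hcr, hhead, hlastg]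
    by_cases hge : cubes[l.toNat] ≥ cubes[r.toNat]
    · rw [if_pos hge, if_pos hge]
      cases hgt : pvGtLast cubes[l.toNat] last with
      | true => simp [hgt]
      | false =>
        simp only [hgt, Bool.false_eq_true, if_false]
        rw [aLoop_eq_g n cubes (l + 1) r _ (by omega) hr (by omega), htail]
    · rw [if_neg hge, if_neg hge]
      cases hgt : pvGtLast cubes[r.toNat] last with
      | true => simp [hgt]
      | false =>
        simp only [hgt, Bool.false_eq_true, if_false]
        rw [aLoop_eq_g n cubes l (r - 1) _ hl (by omega) (by omega), hdlast]

-- ===== VERDICT (by name: the statement is the Claim_ definition above) =====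
theorem can_stack_cubes_spec : Claim_equal_can_stack_cubes := by
  intro cubes _
  unfold Spec_can_stack_cubes can_stack_cubes can_stack_cubes_alt
  rw [aLoop_eq_g cubes.length cubes 0 ((cubes.length : Int) - 1) none (le_refl 0) (by omega) (by omega)]
  simp only [Int.toNat_zero, List.drop_zero, List.take_length]
  rw [g_none, bScan_true]
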